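-- pv_equiv track=rewrite | github.com/tiitinha/adventofcode | day13/day13.py | get_max_coordinates
-- ===== SOURCE A (Python) =====
-- def get_max_coordinates(coordinates: list) -> tuple:
--     max_x = 0
--     max_y = 0
--
--     for coordinate in coordinates:
--         x, y = coordinate
--
--         max_x = x if x > max_x else max_x
--         max_y = y if y > max_y else max_y
--
--     return max_x, max_y
-- ===== SOURCE B (Python) =====
-- def get_max_coordinates(coordinates: list) -> tuple:
--     xs = sorted(x for x, y in coordinates)
--     ys = sorted(y for x, y in coordinates)
--     max_x = xs[-1] if xs and xs[-1] > 0 else 0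
--     max_y = ys[-1] if ys and ys[-1] > 0 else 0
--     return max_x, max_y
-- ===== Notes on version B (the rewrite author's own statement) =====
-- stated objective: alternative
-- what changed: Replaces the single interleaved accumulator loop with a sort-based approach: sort each projected axis and take the last (largest) element of each sorted list, floored at 0; trades O(n) for O(n log n) but needs no manual max tracking.
import Mathlib
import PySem

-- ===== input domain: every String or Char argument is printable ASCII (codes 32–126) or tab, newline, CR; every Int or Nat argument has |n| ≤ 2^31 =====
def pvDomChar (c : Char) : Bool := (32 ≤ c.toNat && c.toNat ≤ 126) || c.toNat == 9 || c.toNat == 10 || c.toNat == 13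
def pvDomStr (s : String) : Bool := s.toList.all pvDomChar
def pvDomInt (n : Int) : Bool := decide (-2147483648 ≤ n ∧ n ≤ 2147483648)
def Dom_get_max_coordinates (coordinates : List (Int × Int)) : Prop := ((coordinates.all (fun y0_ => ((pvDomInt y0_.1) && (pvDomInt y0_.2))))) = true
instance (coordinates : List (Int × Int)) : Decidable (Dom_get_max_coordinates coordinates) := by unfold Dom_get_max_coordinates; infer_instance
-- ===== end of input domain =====

-- B replaces A's single interleaved accumulator loop with a sort-based method: sort each
-- projected axis and take the last (largest) element, floored at 0 (objective: alternative).

-- ===== PORT A =====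
def get_max_coordinates (coordinates : List (Int × Int)) : Int × Int :=
  coordinates.foldl
    (fun acc coordinate =>
      let x := coordinate.1
      let y := coordinate.2
      (if x > acc.1 then x else acc.1, if y > acc.2 then y else acc.2))
    (0, 0)

-- ===== PORT B =====
-- xs[-1] on a nonempty list is its last element; 'xs[-1] if xs and xs[-1] > 0 else 0'
-- is the match on getLast? with the > 0 floor.
def get_max_coordinates_alt (coordinates : List (Int × Int)) : Int × Int :=
  let xs := PySem.List.sorted (coordinates.map Prod.fst) (fun x => x) false
  let ys := PySem.List.sorted (coordinates.map Prod.snd) (fun x => x) false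
  let max_x := match xs.getLast? with
    | some v => if v > 0 then v else 0
    | none => 0
  let max_y := match ys.getLast? with
    | some v => if v > 0 then v else 0
    | none => 0
  (max_x, max_y)

-- ===== PRECONDITION & SPEC =====
def Spec_get_max_coordinates (coordinates : List (Int × Int)) (out : Int × Int) : Prop := out = get_max_coordinates_alt coordinates
instance (coordinates : List (Int × Int)) (out : Int × Int) : Decidable (Spec_get_max_coordinates coordinates out) := by unfold Spec_get_max_coordinates; infer_instance

-- ===== CLAIM (what is proved, stated in full; the proofs are below) =====
def Claim_equal_get_max_coordinates : Prop := ∀ (coordinates : List (Int × Int)), Dom_get_max_coordinates coordinates → Spec_get_max_coordinates coordinates (get_max_coordinates coordinates)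

-- ===== LEMMAS AND PROOFS =====

-- A's interleaved loop is the pair of componentwise max-folds.
theorem gmc_fold_split (l : List (Int × Int)) (mx my : Int) :
    l.foldl
      (fun acc coordinate =>
        let x := coordinate.1
        let y := coordinate.2
        (if x > acc.1 then x else acc.1, if y > acc.2 then y else acc.2))
      (mx, my)
    = ((l.map Prod.fst).foldl max mx, (l.map Prod.snd).foldl max my) := by
  induction l generalizing mx my with
  | nil => rfl
  | cons p t ih =>
    simp only [List.foldl, List.map]
    rw [ih]
    congr 1 <;> congr 1 <;> simp [max_def] <;> omega

theorem gmc_foldl_max_mem (l : List Int) (a : Int) :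
    l.foldl max a = a ∨ l.foldl max a ∈ l := by
  induction l generalizing a with
  | nil => exact Or.inl rfl
  | cons x t ih =>
    simp only [List.foldl]
    rcases ih (max a x) with h | h
    · rw [h]
      rcases max_cases a x with ⟨he, _⟩ | ⟨he, _⟩
      · exact Or.inl he
      · exact Or.inr (by rw [he]; exact List.mem_cons_self)
    · exact Or.inr (List.mem_cons_of_mem _ h)

-- The last element of sorted(l), floored at 0, is the 0-seeded max-fold over l.
theorem gmc_sorted_last (l : List Int) :
    (match (PySem.List.sorted l (fun x => x) false).getLast? with
      | some v => if v > 0 then v else 0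
      | none => 0) = l.foldl max 0 := by
  by_cases hl : l = []
  · subst hl; rfl
  · have hs : PySem.List.sorted l (fun x => x) false ≠ [] := by
      simpa [PySem.List.sorted_eq_nil_iff] using hl
    set s := PySem.List.sorted l (fun x => x) false with hsdef
    have hlast : s.getLast? = some (s.getLast hs) := List.getLast?_eq_some_getLast hs
    set m := s.getLast hs with hm
    have hmem : m ∈ l := by
      rw [← PySem.List.mem_sorted l (fun x => x) false, ← hsdef]
      exact List.getLast_mem hs
    have hub : ∀ y ∈ l, y ≤ m := by
      intro y hy
      have hys : y ∈ s := by
        rw [hsdef, PySem.List.mem_sorted]; exact hy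
      have hpw : s.Pairwise (fun a b => a ≤ b) := by
        rw [hsdef]; exact PySem.List.sorted_pairwise l (fun x => x)
      have hsplit : s.dropLast ++ [m] = s := List.dropLast_append_getLast hs
      rw [← hsplit] at hys hpw
      rcases List.mem_append.mp hys with h | h
      · exact ((List.pairwise_append.mp hpw).2.2 y h m (List.mem_singleton_self m))
      · simp at h; omega
    obtain ⟨h0, hall⟩ := PySem.List.le_foldl_max l 0
    have hmle : m ≤ l.foldl max 0 := hall m hmem
    have hF : l.foldl max 0 = 0 ∨ l.foldl max 0 ∈ l := gmc_foldl_max_mem l 0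
    rw [hlast]
    show (if m > 0 then m else 0) = l.foldl max 0
    rcases hF with h | h
    · split_ifs <;> omega
    · have := hub _ h
      split_ifs <;> omega

-- ===== VERDICT (by name: the statement is the Claim_ definition above) =====
theorem get_max_coordinates_spec : Claim_equal_get_max_coordinates := by
  intro coordinates _
  unfold Spec_get_max_coordinates get_max_coordinates get_max_coordinates_alt
  rw [gmc_fold_split coordinates 0 0]
  simp only []
  rw [← gmc_sorted_last (coordinates.map Prod.fst), ← gmc_sorted_last (coordinates.map Prod.snd)]
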